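-- pv_equiv track=rewrite | github.com/sparkfun/AmbiqSuiteSDK | boards/apollo1_evb/examples/multi_boot_secure_sample/generate_secureboot_assets.py | encrypt_app
-- ===== SOURCE A (Python) =====
-- keyTbl = [0xDEADBEEF, 0xAAAAAAAA, 0x11111111, 0x00000000, 0xFFFFFFFF, 0x55555555, 0xA5A5A5A5, 0x66666666]
--
-- def int_to_bytes(n):
--     A = [n & 0xFF,
--          (n >> 8) & 0xFF,
--          (n >> 16) & 0xFF,
--          (n >> 24) & 0xFF]
--
--     return A
--
-- def word_from_bytes(B, n):
--     return (B[n] + (B[n + 1] << 8) + (B[n + 2] << 16) + (B[n + 3] << 24))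
--
-- def encrypt_app(keyidx, clear_app, iv):
--     key32 = keyTbl[keyidx]
--     applen = len(clear_app)
--     enc_app = []
--     for i in range(0, applen, 4):
--         word = word_from_bytes(clear_app, i)
--         word = (word ^ iv) ^ key32
--         iv = word
--         enc_app.extend(int_to_bytes(word))
--     return enc_app
-- ===== SOURCE B (Python) =====
-- keyTbl = [0xDEADBEEF, 0xAAAAAAAA, 0x11111111, 0x00000000, 0xFFFFFFFF, 0x55555555, 0xA5A5A5A5, 0x66666666]
--
-- def int_to_bytes(n):
--     return [n & 0xFF, (n >> 8) & 0xFF, (n >> 16) & 0xFF, (n >> 24) & 0xFF]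
--
-- def encrypt_app(keyidx, clear_app, iv):
--     # Running-XOR accumulator instead of threading the iv feedback:
--     # e_i = (iv ^ w_0 ^ ... ^ w_i) ^ (key32 if i is even else 0),
--     # because the key cancels itself on alternate steps of the chain.
--     key32 = keyTbl[keyidx]
--     acc = iv
--     enc_app = []
--     for i in range(0, len(clear_app), 4):
--         acc ^= (clear_app[i] + (clear_app[i + 1] << 8)
--                 + (clear_app[i + 2] << 16) + (clear_app[i + 3] << 24))
--         enc_app += int_to_bytes(acc ^ key32 if (i // 4) % 2 == 0 else acc)
--     return enc_app
-- ===== Notes on version B (the rewrite author's own statement) =====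
-- stated objective: alternative
-- what changed: Replaces the iv-feedback chain (iv rebound to the ciphertext word each step) with a running XOR accumulator seeded with iv, exploiting that key32 cancels itself on alternate steps, so the key is XORed in only on even word indices (i//4 even).
import Mathlib
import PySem

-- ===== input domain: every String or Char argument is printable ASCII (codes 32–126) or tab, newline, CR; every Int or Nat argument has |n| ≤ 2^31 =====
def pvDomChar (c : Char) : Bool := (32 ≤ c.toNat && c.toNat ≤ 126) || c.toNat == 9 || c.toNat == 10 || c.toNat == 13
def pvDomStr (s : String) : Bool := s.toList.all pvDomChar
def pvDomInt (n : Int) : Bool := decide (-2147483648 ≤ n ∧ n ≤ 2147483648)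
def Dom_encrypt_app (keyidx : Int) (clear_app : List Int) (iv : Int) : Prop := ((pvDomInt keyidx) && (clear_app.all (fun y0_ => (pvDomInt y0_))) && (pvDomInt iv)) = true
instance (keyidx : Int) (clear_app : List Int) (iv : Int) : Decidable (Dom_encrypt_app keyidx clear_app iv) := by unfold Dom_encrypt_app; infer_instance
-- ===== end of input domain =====

-- B replaces A's iv-feedback chain by a running XOR accumulator (key32 cancels on alternate
-- steps, so it is XORed in only on even word indices); alternative decomposition, same cost.

-- ===== PORT A =====
def pvKeyTbl : List Int := [0xDEADBEEF, 0xAAAAAAAA, 0x11111111, 0x00000000, 0xFFFFFFFF, 0x55555555, 0xA5A5A5A5, 0x66666666]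

def pvIntToBytes (n : Int) : List Int :=
  [PySem.Int.band n 0xFF,
   PySem.Int.band (n >>> (8 : Nat)) 0xFF,
   PySem.Int.band (n >>> (16 : Nat)) 0xFF,
   PySem.Int.band (n >>> (24 : Nat)) 0xFF]

def pvWordFromBytes (B : List Int) (n : Int) : Int :=
  PySem.List.pyGetD B n 0 + (PySem.List.pyGetD B (n + 1) 0 <<< (8 : Nat))
    + (PySem.List.pyGetD B (n + 2) 0 <<< (16 : Nat))
    + (PySem.List.pyGetD B (n + 3) 0 <<< (24 : Nat))

def encrypt_app (keyidx : Int) (clear_app : List Int) (iv : Int) : List Int :=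
  let key32 := PySem.List.pyGetD pvKeyTbl keyidx 0
  let applen : Int := clear_app.length
  ((PySem.List.pyRange 0 applen 4).foldl
    (fun (st : Int × List Int) i =>
      let word := pvWordFromBytes clear_app i
      let word := PySem.Int.bxor (PySem.Int.bxor word st.1) key32
      (word, st.2 ++ pvIntToBytes word))
    (iv, [])).2

-- ===== PORT B =====
def encrypt_app_alt (keyidx : Int) (clear_app : List Int) (iv : Int) : List Int :=
  let key32 := PySem.List.pyGetD pvKeyTbl keyidx 0
  ((PySem.List.pyRange 0 (clear_app.length : Int) 4).foldl
    (fun (st : Int × List Int) i =>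
      let acc := PySem.Int.bxor st.1
        (PySem.List.pyGetD clear_app i 0 + (PySem.List.pyGetD clear_app (i + 1) 0 <<< (8 : Nat))
          + (PySem.List.pyGetD clear_app (i + 2) 0 <<< (16 : Nat))
          + (PySem.List.pyGetD clear_app (i + 3) 0 <<< (24 : Nat)))
      (acc, st.2 ++ pvIntToBytes
        (if PySem.Int.mod (PySem.Int.floordiv i 4) 2 = 0 then PySem.Int.bxor acc key32 else acc)))
    (iv, [])).2

-- ===== PRECONDITION & SPEC =====
-- Pre_ excludes exactly the inputs where the Python raises IndexError: keyidx outside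
-- keyTbl's 8 entries, or a byte list whose length is not a multiple of 4 (last word read
-- runs off the end). Both A and B raise there.
def Pre_encrypt_app (keyidx : Int) (clear_app : List Int) (iv : Int) : Prop :=
  PySem.Raise.InRange 8 keyidx ∧ clear_app.length % 4 = 0

instance (keyidx : Int) (clear_app : List Int) (iv : Int) : Decidable (Pre_encrypt_app keyidx clear_app iv) := by unfold Pre_encrypt_app; infer_instance

def pvWitness_encrypt_app : Int × List Int × Int := (0, [1, 2, 3, 4, 5, 6, 7, 8], 5)

def Spec_encrypt_app (keyidx : Int) (clear_app : List Int) (iv : Int) (out : List Int) : Prop := out = encrypt_app_alt keyidx clear_app iv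
instance (keyidx : Int) (clear_app : List Int) (iv : Int) (out : List Int) : Decidable (Spec_encrypt_app keyidx clear_app iv out) := by unfold Spec_encrypt_app; infer_instance

-- ===== CLAIM (what is proved, stated in full; the proofs are below) =====
def Claim_equal_encrypt_app : Prop := ∀ (keyidx : Int) (clear_app : List Int) (iv : Int), Dom_encrypt_app keyidx clear_app iv → Pre_encrypt_app keyidx clear_app iv → Spec_encrypt_app keyidx clear_app iv (encrypt_app keyidx clear_app iv)

-- ===== LEMMAS AND PROOFS =====

theorem pv_bxor_eq_xor (a b : Int) : PySem.Int.bxor a b = Int.xor a b := by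
  cases a <;> cases b <;>
    simp [PySem.Int.bxor, Int.xor, Int.negSucc_eq] <;> omega

theorem pv_bxor_assoc (a b c : Int) :
    PySem.Int.bxor (PySem.Int.bxor a b) c = PySem.Int.bxor a (PySem.Int.bxor b c) := by
  simp only [pv_bxor_eq_xor]
  cases a <;> cases b <;> cases c <;> simp [Int.xor, Nat.xor_assoc]

theorem pv_bxor_left_comm (a b c : Int) :
    PySem.Int.bxor a (PySem.Int.bxor b c) = PySem.Int.bxor b (PySem.Int.bxor a c) := by
  rw [← pv_bxor_assoc, PySem.Int.bxor_comm a b, pv_bxor_assoc]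

theorem pv_bxor_cancel (a b : Int) :
    PySem.Int.bxor a (PySem.Int.bxor a b) = b := by
  rw [← pv_bxor_assoc, PySem.Int.bxor_self, PySem.Int.bxor_comm, PySem.Int.bxor_zero]


theorem pv_bxor_zero_left (a : Int) : PySem.Int.bxor 0 a = a := by
  rw [PySem.Int.bxor_comm, PySem.Int.bxor_zero]

theorem pv_main (xs : List Int) (key iv : Int) (n : Nat) :
    (((List.range n).map (fun k => (0 : Int) + 4 * ↑k)).foldl
      (fun (st : Int × List Int) i =>
        let word := pvWordFromBytes xs i
        let word := PySem.Int.bxor (PySem.Int.bxor word st.1) key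
        (word, st.2 ++ pvIntToBytes word)) (iv, [])).2
      = (((List.range n).map (fun k => (0 : Int) + 4 * ↑k)).foldl
      (fun (st : Int × List Int) i =>
        let acc := PySem.Int.bxor st.1 (pvWordFromBytes xs i)
        (acc, st.2 ++ pvIntToBytes
          (if PySem.Int.mod (PySem.Int.floordiv i 4) 2 = 0 then PySem.Int.bxor acc key else acc)))
      (iv, [])).2
    ∧ (((List.range n).map (fun k => (0 : Int) + 4 * ↑k)).foldl
      (fun (st : Int × List Int) i =>
        let word := pvWordFromBytes xs i
        let word := PySem.Int.bxor (PySem.Int.bxor word st.1) key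
        (word, st.2 ++ pvIntToBytes word)) (iv, [])).1
      = PySem.Int.bxor (((List.range n).map (fun k => (0 : Int) + 4 * ↑k)).foldl
      (fun (st : Int × List Int) i =>
        let acc := PySem.Int.bxor st.1 (pvWordFromBytes xs i)
        (acc, st.2 ++ pvIntToBytes
          (if PySem.Int.mod (PySem.Int.floordiv i 4) 2 = 0 then PySem.Int.bxor acc key else acc)))
      (iv, [])).1 (if n % 2 = 1 then key else 0) := by
  induction n with
  | zero => simp [PySem.Int.bxor_zero]
  | succ n ih =>
    obtain ⟨hout, hst⟩ := ih
    rw [List.range_succ, List.map_append, List.foldl_append, List.foldl_append]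
    simp only [List.map_cons, List.map_nil, List.foldl_cons, List.foldl_nil]
    have hcond : PySem.Int.mod (PySem.Int.floordiv ((0 : Int) + 4 * ↑n) 4) 2 = (n : Int) % 2 := by
      rw [PySem.Int.floordiv_eq_ediv_of_pos (by norm_num), PySem.Int.mod_eq_emod_of_pos (by norm_num)]
      omega
    simp only [hcond, hst, hout]
    by_cases hp : n % 2 = 1
    · rw [if_pos hp, if_neg (show ¬((n : Int) % 2 = 0) by omega),
        if_neg (show ¬((n + 1) % 2 = 1) by omega)]
      constructor
      · congr 1
        congr 1
        simp [pv_bxor_left_comm, pv_bxor_cancel, PySem.Int.bxor_comm]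
      · simp [pv_bxor_left_comm, pv_bxor_cancel, pv_bxor_zero_left, PySem.Int.bxor_comm]
    · rw [if_neg hp, if_pos (show ((n : Int) % 2 = 0) by omega),
        if_pos (show ((n + 1) % 2 = 1) by omega), PySem.Int.bxor_zero]
      constructor
      · congr 1
        congr 1
        simp [PySem.Int.bxor_comm]
      · simp [PySem.Int.bxor_comm]

theorem encrypt_app_spec : Claim_equal_encrypt_app := by
  intro keyidx clear_app iv _ _
  unfold Spec_encrypt_app encrypt_app encrypt_app_alt
  rw [PySem.List.pyRange_of_pos 0 (clear_app.length : Int) (by norm_num)]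
  exact (pv_main clear_app (PySem.List.pyGetD pvKeyTbl keyidx 0) iv _).1
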